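-- pv_equiv track=rewrite | github.com/EverFelliphes/Grover_Nanogram_Solver | src/utils.py | compute_max_window_aux
-- ===== SOURCE A (Python) =====
-- def _block_window_size(line_len, block_len, b_idx, clue_list):
--     """
--     Number of valid sliding-window positions for block b_idx in a line.
--     s_min and s_max are computed from eq. (17)-(18) of the paper.
--     Returns (s_min, s_max, window_size).
--     """
--     # s_min for block b (0-indexed)
--     s_min = 0
--     for i in range(b_idx):
--         s_min += clue_list[i] + 1  # block length + mandatory gap
--
--     # s_max for block b (0-indexed)
--     # s_max = L - sum(clue[b..end]) - (k - b - 1)  [0-indexed variant]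
--     remaining_blocks = clue_list[b_idx:]
--     k = len(clue_list)
--     s_max = line_len - sum(remaining_blocks) - (k - b_idx - 1)
--
--     window_size = max(0, s_max - s_min + 1)
--     return s_min, s_max, window_size
--
-- def compute_max_window_aux(N, M, row_hints, col_hints):
--     """
--     Maximum number of window-auxiliary qubits needed for any single block
--     across all lines/blocks.  These are reused block-by-block (uncomputed
--     locally within each block per eq. (23)).
--     """
--     max_win = 1
--     for r, hints in enumerate(row_hints):
--         if hints == [0]:
--             continue
--         for b_idx, blk_len in enumerate(hints):
--             _, _, win_size = _block_window_size(M, blk_len, b_idx, hints)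
--             max_win = max(max_win, win_size)
--     for c, hints in enumerate(col_hints):
--         if hints == [0]:
--             continue
--         for b_idx, blk_len in enumerate(hints):
--             _, _, win_size = _block_window_size(N, blk_len, b_idx, hints)
--             max_win = max(max_win, win_size)
--     return max(1, max_win)
-- ===== SOURCE B (Python) =====
-- def _line_best(L, hint_groups, best):
--     # Every block of a line has the same window size: L - sum(hints) - len(hints) + 2.
--     for hints in hint_groups:
--         if hints == [0] or not hints:
--             continue
--         best = max(best, L - sum(hints) - len(hints) + 2)
--     return best
--
-- def compute_max_window_aux(N, M, row_hints, col_hints):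
--     return _line_best(N, col_hints, _line_best(M, row_hints, 1))
-- ===== Notes on version B (the rewrite author's own statement) =====
-- stated objective: faster
-- what changed: B replaces A's per-block recomputation of prefix/suffix clue sums (quadratic per line) with the algebraic observation that every block of a line has the same window size L - sum(hints) - len(hints) + 2, so each line is handled by one sum in a single pass.
import Mathlib
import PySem

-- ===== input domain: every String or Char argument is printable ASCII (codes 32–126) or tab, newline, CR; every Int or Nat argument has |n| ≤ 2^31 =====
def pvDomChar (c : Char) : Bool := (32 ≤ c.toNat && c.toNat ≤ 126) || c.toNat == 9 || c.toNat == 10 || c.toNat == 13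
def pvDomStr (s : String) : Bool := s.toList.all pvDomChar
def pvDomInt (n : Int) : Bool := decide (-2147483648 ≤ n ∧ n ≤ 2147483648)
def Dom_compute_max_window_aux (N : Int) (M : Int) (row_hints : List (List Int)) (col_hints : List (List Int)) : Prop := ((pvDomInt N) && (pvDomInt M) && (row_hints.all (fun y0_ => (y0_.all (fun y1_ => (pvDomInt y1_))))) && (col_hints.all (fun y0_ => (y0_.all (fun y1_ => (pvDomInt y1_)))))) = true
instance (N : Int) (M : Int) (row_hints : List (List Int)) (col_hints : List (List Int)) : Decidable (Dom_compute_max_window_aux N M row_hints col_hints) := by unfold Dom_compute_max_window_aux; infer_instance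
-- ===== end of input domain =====

-- ===== PORT A =====
-- B computes the same values by one closed-form pass per line; equivalence of return values proved below.
-- clue_list[i] inside _block_window_size is always in range at A's call sites (i < b_idx < len(clue_list)),
-- so pyGetD's default is never reached.
def blockWindowSize (line_len : Int) (block_len : Int) (b_idx : Int) (clue_list : List Int) : Int × Int × Int :=
  let s_min := (PySem.List.pyRange 0 b_idx 1).foldl (fun acc i => acc + PySem.List.pyGetD clue_list i 0 + 1) 0
  let remaining_blocks := PySem.List.slice clue_list (some b_idx) none
  let k : Int := clue_list.length
  let s_max := line_len - remaining_blocks.sum - (k - b_idx - 1)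
  let window_size := max 0 (s_max - s_min + 1)
  (s_min, s_max, window_size)

def compute_max_window_aux (N : Int) (M : Int) (row_hints : List (List Int)) (col_hints : List (List Int)) : Int :=
  let max_win : Int := 1
  let max_win := row_hints.foldl (fun mw hints =>
    if hints = [0] then mw
    else (PySem.List.enumerate hints).foldl
      (fun mw p => max mw (blockWindowSize M p.2 p.1 hints).2.2) mw) max_win
  let max_win := col_hints.foldl (fun mw hints =>
    if hints = [0] then mw
    else (PySem.List.enumerate hints).foldl
      (fun mw p => max mw (blockWindowSize N p.2 p.1 hints).2.2) mw) max_win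
  max 1 max_win

-- ===== PORT B =====
def lineBest (L : Int) (hint_groups : List (List Int)) (best : Int) : Int :=
  hint_groups.foldl (fun best hints =>
    if hints = [0] ∨ hints = [] then best
    else max best (L - hints.sum - (hints.length : Int) + 2)) best

def compute_max_window_aux_alt (N : Int) (M : Int) (row_hints : List (List Int)) (col_hints : List (List Int)) : Int :=
  lineBest N col_hints (lineBest M row_hints 1)

-- ===== PRECONDITION & SPEC =====
def Spec_compute_max_window_aux (N : Int) (M : Int) (row_hints : List (List Int)) (col_hints : List (List Int)) (out : Int) : Prop := out = compute_max_window_aux_alt N M row_hints col_hints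
instance (N : Int) (M : Int) (row_hints : List (List Int)) (col_hints : List (List Int)) (out : Int) : Decidable (Spec_compute_max_window_aux N M row_hints col_hints out) := by unfold Spec_compute_max_window_aux; infer_instance

-- ===== CLAIM (what is proved, stated in full; the proofs are below) =====
def Claim_equal_compute_max_window_aux : Prop := ∀ (N : Int) (M : Int) (row_hints : List (List Int)) (col_hints : List (List Int)), Dom_compute_max_window_aux N M row_hints col_hints → Spec_compute_max_window_aux N M row_hints col_hints (compute_max_window_aux N M row_hints col_hints)

-- ===== LEMMAS AND PROOFS =====

-- s_min accumulated in A's inner range loop is the prefix sum of the first b clues plus b.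
lemma smin_eq (clue_list : List Int) (b : Nat) (hb : b ≤ clue_list.length) :
    (PySem.List.pyRange 0 (b : Int) 1).foldl
      (fun acc i => acc + PySem.List.pyGetD clue_list i 0 + 1) 0
    = (clue_list.take b).sum + b := by
  induction b with
  | zero => simp [PySem.List.pyRange]
  | succ n ih =>
    rw [show ((n + 1 : Nat) : Int) = (n : Int) + 1 by push_cast; ring,
        PySem.List.pyRange_one_succ_right (by positivity), List.foldl_append]
    have hn : n < clue_list.length := by omega
    rw [ih (by omega)]
    simp only [List.foldl_cons, List.foldl_nil]
    rw [PySem.List.pyGetD_natCast, List.getD_eq_getElem _ _ hn,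
        List.sum_take_succ _ _ hn]
    ring

-- Every block of a line has the same window size: L - sum - len + 2.
lemma bws_const (L blk : Int) (clue_list : List Int) (b : Nat) (hb : b < clue_list.length) :
    (blockWindowSize L blk (b : Int) clue_list).2.2
    = max 0 (L - clue_list.sum - (clue_list.length : Int) + 2) := by
  unfold blockWindowSize
  simp only
  rw [smin_eq clue_list b (le_of_lt hb), PySem.List.slice_from_natCast]
  have hsum : (clue_list.take b).sum + (clue_list.drop b).sum = clue_list.sum := by
    rw [← List.sum_append, List.take_append_drop]
  have : L - (clue_list.drop b).sum - ((clue_list.length : Int) - (b : Int) - 1)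
      - ((clue_list.take b).sum + (b : Int)) + 1
      = L - clue_list.sum - (clue_list.length : Int) + 2 := by omega
  rw [show L - (clue_list.drop b).sum - ((clue_list.length : Int) - (b : Int) - 1)
      - ((clue_list.take b).sum + (b : Int)) + 1
      = L - clue_list.sum - (clue_list.length : Int) + 2 from this]

-- Folding 'max · w' over a nonempty list is one max.
lemma foldl_max_const {α : Type} (l : List α) (w m : Int) (hl : l ≠ []) :
    l.foldl (fun m _ => max m w) m = max m w := by
  induction l generalizing m with
  | nil => exact absurd rfl hl
  | cons x t ih =>
    simp only [List.foldl_cons]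
    rcases eq_or_ne t [] with h | h
    · simp [h]
    · rw [ih (max m w) h, max_assoc, max_self]

-- A's inner enumerate loop over a nonempty line equals one max with the closed form.
lemma inner_loop (L : Int) (hints : List Int) (m : Int) (hne : hints ≠ []) (hm : 0 ≤ m) :
    (PySem.List.enumerate hints).foldl
      (fun mw p => max mw (blockWindowSize L p.2 p.1 hints).2.2) m
    = max m (L - hints.sum - (hints.length : Int) + 2) := by
  have hcong := PySem.List.foldl_congr_mem
    (l := PySem.List.enumerate hints) (init := m)
    (f := fun mw p => max mw (blockWindowSize L p.2 p.1 hints).2.2)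
    (g := fun mw _ => max mw (max 0 (L - hints.sum - (hints.length : Int) + 2)))
    (by
      intro acc p hp
      rw [PySem.List.mem_enumerate_iff] at hp
      obtain ⟨k, hk, rfl⟩ := hp
      simp only [zero_add]
      rw [bws_const L hints[k] hints k hk])
  rw [hcong, foldl_max_const _ _ _ (by
        cases hints with
        | nil => exact absurd rfl hne
        | cons a t => simp [PySem.List.enumerate_cons]),
      ← max_assoc, max_eq_left hm]

-- A's per-direction foldl equals B's lineBest (accumulator nonnegative).
lemma line_fold (L : Int) (groups : List (List Int)) (m : Int) (hm : 0 ≤ m) :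
    groups.foldl (fun mw hints =>
      if hints = [0] then mw
      else (PySem.List.enumerate hints).foldl
        (fun mw p => max mw (blockWindowSize L p.2 p.1 hints).2.2) mw) m
    = lineBest L groups m := by
  induction groups generalizing m with
  | nil => simp [lineBest]
  | cons hints t ih =>
    simp only [List.foldl_cons, lineBest] at *
    rcases eq_or_ne hints [0] with h0 | h0
    · simp only [h0, if_pos]
      exact ih m hm
    · rcases eq_or_ne hints [] with hn | hn
      · subst hn
        simp only [if_neg h0, PySem.List.enumerate, List.foldl_nil]
        exact ih m hm
      · rw [if_neg h0, if_neg (by simp [h0, hn]), inner_loop L hints m hn hm]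
        exact ih _ (le_trans hm (le_max_left _ _))

-- lineBest never decreases its accumulator.
lemma le_lineBest (L : Int) (groups : List (List Int)) (m : Int) : m ≤ lineBest L groups m := by
  induction groups generalizing m with
  | nil => simp [lineBest]
  | cons hints t ih =>
    simp only [lineBest, List.foldl_cons] at *
    split_ifs with h
    · exact ih m
    · exact le_trans (le_max_left _ _) (ih _)

-- ===== VERDICT (by name: the statement is the Claim_ definition above) =====
theorem compute_max_window_aux_spec : Claim_equal_compute_max_window_aux := by
  intro N M row_hints col_hints _
  unfold Spec_compute_max_window_aux compute_max_window_aux compute_max_window_aux_alt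
  simp only
  rw [line_fold M row_hints 1 (by norm_num),
      line_fold N col_hints _ (le_trans (by norm_num) (le_lineBest M row_hints 1))]
  exact max_eq_right (le_trans (le_trans (by norm_num) (le_lineBest M row_hints 1))
    (le_lineBest N col_hints _))
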